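-- pv_equiv track=rewrite | github.com/amol179/DSA_Notes_Dump | Code_Force/1000/Young Physicist/Young Physicist.py | is_in_equilibrium
-- ===== SOURCE A (Python) =====
-- def is_in_equilibrium(forces):
--     # Initialize sums for x, y, and z coordinates
--     sum_x = 0
--     sum_y = 0
--     sum_z = 0
--
--     # Sum up the coordinates of all forces
--     for force in forces:
--         sum_x += force[0]
--         sum_y += force[1]
--         sum_z += force[2]
--
--     # Check if all sums are zero
--     if sum_x == 0 and sum_y == 0 and sum_z == 0:
--         return "YES"
--     else:
--         return "NO"
-- ===== SOURCE B (Python) =====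
-- def is_in_equilibrium(forces):
--     # Divide-and-conquer: recursively sum the vector over halves of the list,
--     # then compare the total vector to (0, 0, 0).
--     def total(lo, hi):
--         if hi - lo == 0:
--             return (0, 0, 0)
--         if hi - lo == 1:
--             f = forces[lo]
--             return (f[0], f[1], f[2])
--         mid = (lo + hi) // 2
--         ax, ay, az = total(lo, mid)
--         bx, by, bz = total(mid, hi)
--         return (ax + bx, ay + by, az + bz)
--     return "YES" if total(0, len(forces)) == (0, 0, 0) else "NO"
-- ===== Notes on version B (the rewrite author's own statement) =====
-- stated objective: alternative
-- what changed: Replaces the single linear pass with three running accumulators by a divide-and-conquer recursion that splits the index range in halves, sums each half's force vector recursively, and compares the combined total vector to (0,0,0).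
import Mathlib
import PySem

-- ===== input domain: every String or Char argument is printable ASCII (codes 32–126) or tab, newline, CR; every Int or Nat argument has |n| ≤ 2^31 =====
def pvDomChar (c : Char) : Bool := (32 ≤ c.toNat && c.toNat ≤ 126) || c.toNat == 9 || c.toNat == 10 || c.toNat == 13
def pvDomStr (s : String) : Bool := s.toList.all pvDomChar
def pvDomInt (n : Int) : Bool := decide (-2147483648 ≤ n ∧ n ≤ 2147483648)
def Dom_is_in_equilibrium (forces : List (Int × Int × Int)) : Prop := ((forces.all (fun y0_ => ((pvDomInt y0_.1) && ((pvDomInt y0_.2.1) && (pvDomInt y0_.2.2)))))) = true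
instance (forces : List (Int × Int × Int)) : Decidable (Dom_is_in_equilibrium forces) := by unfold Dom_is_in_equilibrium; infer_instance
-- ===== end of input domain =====

-- ===== PORT A =====
-- A: single pass updating three accumulators, then check all three are zero.
def is_in_equilibrium (forces : List (Int × Int × Int)) : String :=
  let s := forces.foldl (fun (acc : Int × Int × Int) force =>
    (acc.1 + force.1, acc.2.1 + force.2.1, acc.2.2 + force.2.2)) (0, 0, 0)
  if s.1 = 0 ∧ s.2.1 = 0 ∧ s.2.2 = 0 then "YES" else "NO"

-- ===== PORT B =====
-- B: divide-and-conquer — split the list in halves, sum each half's vector recursively,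
-- combine, and compare the total vector to (0,0,0).  (Python recurses on the index range
-- [lo,hi) of the original list; splitting at (lo+hi)//2 is splitting the sublist at
-- half its length, which take/drop at length/2 transcribes.)
def vsumB (l : List (Int × Int × Int)) : Int × Int × Int :=
  match l with
  | [] => (0, 0, 0)
  | [f] => (f.1, f.2.1, f.2.2)
  | a :: b :: t =>
    let full := a :: b :: t
    let mid := full.length / 2
    let s1 := vsumB (full.take mid)
    let s2 := vsumB (full.drop mid)
    (s1.1 + s2.1, s1.2.1 + s2.2.1, s1.2.2 + s2.2.2)
termination_by l.length
decreasing_by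
  · simp [List.length_take]; omega
  · simp [List.length_drop]; omega

def is_in_equilibrium_alt (forces : List (Int × Int × Int)) : String :=
  if vsumB forces = (0, 0, 0) then "YES" else "NO"

-- ===== PRECONDITION & SPEC =====
def Spec_is_in_equilibrium (forces : List (Int × Int × Int)) (out : String) : Prop := out = is_in_equilibrium_alt forces
instance (forces : List (Int × Int × Int)) (out : String) : Decidable (Spec_is_in_equilibrium forces out) := by unfold Spec_is_in_equilibrium; infer_instance

-- ===== CLAIM =====
def Claim_equal_is_in_equilibrium : Prop := ∀ (forces : List (Int × Int × Int)), Dom_is_in_equilibrium forces → Spec_is_in_equilibrium forces (is_in_equilibrium forces)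

-- ===== LEMMAS AND PROOFS =====

lemma equilib_fold (forces : List (Int × Int × Int)) (a b c : Int) :
    forces.foldl (fun (acc : Int × Int × Int) force =>
      (acc.1 + force.1, acc.2.1 + force.2.1, acc.2.2 + force.2.2)) (a, b, c)
    = (a + (forces.map (fun f => f.1)).sum,
       b + (forces.map (fun f => f.2.1)).sum,
       c + (forces.map (fun f => f.2.2)).sum) := by
  induction forces generalizing a b c with
  | nil => simp
  | cons h t ih => simp [List.foldl, ih]; refine ⟨by ring, by ring, by ring⟩

lemma vsumB_eq (l : List (Int × Int × Int)) :
    vsumB l = ((l.map (fun f => f.1)).sum,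
               (l.map (fun f => f.2.1)).sum,
               (l.map (fun f => f.2.2)).sum) := by
  induction l using vsumB.induct with
  | case1 => simp [vsumB]
  | case2 f => simp [vsumB]
  | case3 a b t full mid ihtake ihdrop =>
    rw [vsumB]
    have h := List.take_append_drop ((a :: b :: t).length / 2) (a :: b :: t)
    conv_rhs => rw [← h]
    simp only [mid, full, List.length_cons] at ihtake ihdrop
    simp [ihtake, ihdrop]

-- ===== VERDICT =====
theorem is_in_equilibrium_spec : Claim_equal_is_in_equilibrium := by
  intro forces _
  unfold Spec_is_in_equilibrium is_in_equilibrium is_in_equilibrium_alt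
  rw [equilib_fold, vsumB_eq]
  simp [Prod.ext_iff]
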